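-- pv_equiv track=rewrite | github.com/bernizhel/kosenko-op-2022 | 4/10.py | fibonacci_sum_from
-- ===== SOURCE A (Python) =====
-- def fibonacci_sum_from(n, k):
--     total = 0
--     prev_num = 0
--     next_num = 1
--     for i in range(1, k + n + 1):
--         if i >= k:
--             total += prev_num
--         prev_num, next_num = next_num, prev_num + next_num
--     return total
-- ===== SOURCE B (Python) =====
-- def _fib_pair(m):
--     # fast doubling: returns (F(m), F(m+1))
--     if m == 0:
--         return (0, 1)
--     a, b = _fib_pair(m // 2)
--     c = a * (2 * b - a)
--     d = a * a + b * b
--     if m % 2 == 1: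
--         return (d, c + d)
--     return (c, d)
--
--
-- def fibonacci_sum_from(n, k):
--     hi = k + n            # last loop index of the summed range
--     lo = max(1, k)        # first index actually summed
--     if hi < lo:
--         return 0
--     # sum_{i=lo}^{hi} F(i-1) = F(hi+1) - F(lo)
--     return _fib_pair(hi + 1)[0] - _fib_pair(lo)[0]
-- ===== Notes on version B (the rewrite author's own statement) =====
-- stated objective: faster
-- what changed: Replaced the O(k+n) iterative Fibonacci loop with the closed-form prefix-sum identity sum F(i-1) = F(hi+1) - F(lo), computing the two Fibonacci numbers by fast doubling; intended as faster, measured ~118x at n=65536, though both programs still time out on astronomically large 2^31-scale indices where the result itself has billions of bits.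
import Mathlib
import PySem

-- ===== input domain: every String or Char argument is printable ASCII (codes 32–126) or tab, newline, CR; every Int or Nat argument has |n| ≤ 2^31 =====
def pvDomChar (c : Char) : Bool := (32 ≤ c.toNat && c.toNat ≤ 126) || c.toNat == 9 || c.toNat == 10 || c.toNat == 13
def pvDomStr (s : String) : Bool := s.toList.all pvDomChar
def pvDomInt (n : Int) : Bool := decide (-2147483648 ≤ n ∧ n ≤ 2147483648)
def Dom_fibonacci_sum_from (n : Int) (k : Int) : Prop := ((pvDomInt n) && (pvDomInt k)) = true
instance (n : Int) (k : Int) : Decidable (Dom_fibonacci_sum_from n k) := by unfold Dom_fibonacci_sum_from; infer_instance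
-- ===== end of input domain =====

-- ===== PORT A =====
-- B replaces A's iterative loop by the Fibonacci prefix-sum closed form with fast-doubling Fibonacci
-- (intended as faster; a timing run measured ~118x at its largest size where both finished).
-- one loop step of A: state = (total, prev_num, next_num)
def fibAStep (k : Int) (st : Int × Int × Int) (i : Int) : Int × Int × Int :=
  let total := if i ≥ k then st.1 + st.2.1 else st.1
  (total, st.2.2, st.2.1 + st.2.2)

def fibonacci_sum_from (n : Int) (k : Int) : Int :=
  ((PySem.List.pyRange 1 (k + n + 1) 1).foldl (fibAStep k) (0, 0, 1)).1

-- ===== PORT B =====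
-- fast doubling: returns (F(m), F(m+1))
def fibPair : Nat → Int × Int
  | 0 => (0, 1)
  | (m+1) =>
    let p := fibPair ((m+1) / 2)
    let a := p.1
    let b := p.2
    let c := a * (2 * b - a)
    let d := a * a + b * b
    if (m+1) % 2 = 1 then (d, c + d) else (c, d)
decreasing_by omega

def fibonacci_sum_from_alt (n : Int) (k : Int) : Int :=
  let hi := k + n
  let lo := max 1 k
  if hi < lo then 0
  else (fibPair (hi + 1).toNat).1 - (fibPair lo.toNat).1

-- ===== PRECONDITION & SPEC =====
def Spec_fibonacci_sum_from (n : Int) (k : Int) (out : Int) : Prop := out = fibonacci_sum_from_alt n k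
instance (n : Int) (k : Int) (out : Int) : Decidable (Spec_fibonacci_sum_from n k out) := by unfold Spec_fibonacci_sum_from; infer_instance

-- ===== CLAIM (what is proved, stated in full; the proofs are below) =====
def Claim_equal_fibonacci_sum_from : Prop := ∀ (n : Int) (k : Int), Dom_fibonacci_sum_from n k → Spec_fibonacci_sum_from n k (fibonacci_sum_from n k)

-- ===== LEMMAS AND PROOFS =====
def fibZ (m : Nat) : Int := (Nat.fib m : Int)

theorem fibZ_add_two (m : Nat) : fibZ (m + 2) = fibZ m + fibZ (m + 1) := by
  unfold fibZ
  rw [Nat.fib_add_two]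
  push_cast
  ring

theorem fibPair_eq (m : Nat) : fibPair m = (fibZ m, fibZ (m + 1)) := by
  induction m using Nat.strong_induction_on with
  | _ m ih =>
    match m with
    | 0 => simp [fibPair, fibZ]
    | (m+1) =>
      have h2 : (m+1)/2 < m+1 := by omega
      have ihh := ih ((m+1)/2) h2
      have hmono : Nat.fib ((m+1)/2) ≤ 2 * Nat.fib ((m+1)/2 + 1) := by
        have h := Nat.fib_mono (show (m+1)/2 ≤ (m+1)/2 + 1 by omega)
        omega
      have heven : fibZ ((m+1)/2) * (2 * fibZ ((m+1)/2 + 1) - fibZ ((m+1)/2)) = fibZ (2 * ((m+1)/2)) := by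
        simp only [fibZ]
        rw [Nat.fib_two_mul, Nat.cast_mul, Nat.cast_sub hmono]
        push_cast
        ring
      have hodd : fibZ ((m+1)/2) * fibZ ((m+1)/2) + fibZ ((m+1)/2 + 1) * fibZ ((m+1)/2 + 1) = fibZ (2 * ((m+1)/2) + 1) := by
        simp only [fibZ]
        rw [Nat.fib_two_mul_add_one]
        push_cast
        ring
      rw [fibPair]
      simp only [ihh]
      by_cases hpar : (m+1) % 2 = 1
      · simp only [if_pos hpar]
        rw [heven, hodd]
        rw [show 2 * ((m+1)/2) = m from by omega]
        rw [show fibZ (m + 1 + 1) = fibZ m + fibZ (m + 1) from fibZ_add_two m]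
      · simp only [if_neg hpar]
        rw [heven, hodd]
        rw [show 2 * ((m+1)/2) = m + 1 from by omega]

-- A's running total after the first m iterations
def aSum (k : Int) : Nat → Int
  | 0 => 0
  | (m+1) => if ((m : Int) + 1) ≥ k then aSum k m + fibZ m else aSum k m

theorem loopA (k : Int) (m : Nat) :
    (PySem.List.pyRange 1 ((m : Int) + 1) 1).foldl (fibAStep k) (0, 0, 1)
      = (aSum k m, fibZ m, fibZ (m + 1)) := by
  induction m with
  | zero => simp [PySem.List.pyRange_one_eq_nil, aSum, fibZ]
  | succ m ih =>
    have hle : (1 : Int) ≤ (m : Int) + 1 := by omega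
    rw [show ((m : Nat) + 1 : Nat) = m + 1 from rfl]
    rw [show (((m : Nat) + 1 : Nat) : Int) + 1 = ((m : Int) + 1) + 1 by push_cast; ring]
    rw [PySem.List.pyRange_one_succ_right hle]
    rw [List.foldl_append, ih]
    simp only [List.foldl, fibAStep, aSum]
    rw [show fibZ (m + 1 + 1) = fibZ m + fibZ (m + 1) from fibZ_add_two m]

theorem aSum_small (k : Int) (m : Nat) (h : (m : Int) < max 1 k) : aSum k m = 0 := by
  induction m with
  | zero => rfl
  | succ m ih =>
    have hk : ¬ (((m : Int) + 1) ≥ k) := by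
      push_cast at h ⊢; omega
    simp only [aSum, if_neg hk]
    exact ih (by push_cast at h ⊢; omega)

theorem aSum_ge (k : Int) (m : Nat) (h : max 1 k ≤ (m : Int) + 1) :
    aSum k m = fibZ (m + 1) - fibZ (max 1 k).toNat := by
  induction m with
  | zero =>
    have h1 : max 1 k = 1 := by omega
    simp [aSum, h1, fibZ]
  | succ m ih =>
    by_cases hc : max 1 k ≤ (m : Int) + 1
    · have hk : (((m : Int) + 1) ≥ k) := by omega
      simp only [aSum, if_pos hk]
      rw [ih hc, fibZ_add_two]
      ring
    · -- max 1 k = m + 2 here: this is the step just before the summed range starts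
      have hk : ¬ (((m : Int) + 1) ≥ k) := by omega
      simp only [aSum, if_neg hk]
      rw [aSum_small k m (by omega)]
      have hm : (max 1 k).toNat = m + 1 + 1 := by omega
      rw [hm]
      simp

-- ===== VERDICT (by name: the statement is the Claim_ definition above) =====
theorem fibonacci_sum_from_spec : Claim_equal_fibonacci_sum_from := by
  intro n k _
  unfold Spec_fibonacci_sum_from fibonacci_sum_from fibonacci_sum_from_alt
  simp only
  by_cases hhi : k + n < max 1 k
  · rw [if_pos hhi]
    by_cases hz : k + n < 1
    · rw [PySem.List.pyRange_one_eq_nil (by omega)]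
      rfl
    · have hm : k + n = ((k + n).toNat : Int) := by omega
      rw [show k + n + 1 = ((k + n).toNat : Int) + 1 by omega]
      rw [loopA]
      simp only
      exact aSum_small k (k + n).toNat (by omega)
  · rw [if_neg hhi]
    have h1 : (1 : Int) ≤ k + n := by omega
    rw [show k + n + 1 = ((k + n).toNat : Int) + 1 by omega]
    rw [loopA]
    simp only
    rw [aSum_ge k (k + n).toNat (by omega)]
    rw [fibPair_eq, fibPair_eq]
    simp only
    rw [show ((((k + n).toNat : Int)) + 1).toNat = (k + n).toNat + 1 from by omega]
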